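-- pv_equiv track=rewrite | github.com/ngaut/jarvis | jarvis/smartgpt/utils.py | strip_yaml
-- ===== SOURCE A (Python) =====
-- def strip_yaml(text):
--     # Strip whitespace (including newline) from end
--     text = text.rstrip()
--
--     # keep removing the last "```" if it exists
--     while text.endswith("```"):
--         text = text[:-3]
--         text = text.rstrip()
--
--     # if text starts with "```yaml\n", remove it
--     if text.startswith("```yaml\n"):
--         text = text[8:]
--
--     return text
-- ===== SOURCE B (Python) =====
-- def strip_yaml(text):
--     # One O(n) scan over the reversed text: advance an index past whitespace
--     # and 3-backtick fences instead of repeatedly slicing/rstripping the string.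
--     rev = text[::-1]
--     n = len(rev)
--     j = 0
--     while True:
--         while j < n and rev[j].isspace():
--             j += 1
--         if rev[j:j + 3] == '```':
--             j += 3
--         else:
--             break
--     text = rev[j:][::-1]
--     if text.startswith("```yaml\n"):
--         text = text[8:]
--     return text
-- ===== Notes on version B (the rewrite author's own statement) =====
-- stated objective: alternative
-- what changed: Replaces A's repeated rstrip/slice passes (each rebuilding the string) with a single index scan over the reversed text that skips whitespace and 3-backtick fences, then slices once.
import Mathlib
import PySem

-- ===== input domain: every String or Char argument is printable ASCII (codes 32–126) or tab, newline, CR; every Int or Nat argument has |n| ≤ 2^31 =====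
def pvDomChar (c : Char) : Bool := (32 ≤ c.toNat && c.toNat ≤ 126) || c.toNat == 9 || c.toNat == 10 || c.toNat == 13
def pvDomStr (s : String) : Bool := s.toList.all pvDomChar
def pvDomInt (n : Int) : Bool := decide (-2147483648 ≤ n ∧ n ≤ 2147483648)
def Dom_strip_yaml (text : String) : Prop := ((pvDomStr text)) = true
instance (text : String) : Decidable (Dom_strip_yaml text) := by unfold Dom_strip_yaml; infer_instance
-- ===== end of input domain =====

-- B replaces A's repeated rstrip/slice passes by a single index scan over the reversed text (alternative decomposition).

-- ===== PORT A =====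
-- termination helper, cited by pvLoopA's decreasing_by
theorem pvLoopA_dec (s : String) (h : PySem.Str.endswith s "```" = true) :
    (PySem.Str.rstrip (PySem.Str.slice s none (some (-3)))).toList.length < s.toList.length := by
  have hsuf : ("```" : String).toList <:+ s.toList :=
    (PySem.Chars.endswith_iff s.toList ("```" : String).toList).mp h
  have hlen3 : 3 ≤ s.toList.length := by simpa using hsuf.length_le
  have hslice : (PySem.Str.slice s none (some (-3))).toList = s.toList.take (s.toList.length - 3) := by
    rw [PySem.Str.toList_slice, PySem.Chars.slice_eq_listSlice,
        PySem.List.slice_to_neg_ofNat s.toList 3 (by omega)]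
  rw [PySem.Str.toList_rstrip, PySem.Chars.rstrip]
  have h1 := List.length_dropWhile_le PySem.Chars.isspace
      ((PySem.Str.slice s none (some (-3))).toList.reverse)
  have h2 : (PySem.Str.slice s none (some (-3))).toList.length = s.toList.length - 3 := by
    rw [hslice]; simp
  simp only [List.length_reverse] at h1 ⊢
  omega

-- the while loop: keep removing a trailing "```" and rstripping
def pvLoopA (s : String) : String :=
  if h : PySem.Str.endswith s "```" = true then
    pvLoopA (PySem.Str.rstrip (PySem.Str.slice s none (some (-3))))
  else s
termination_by s.toList.length
decreasing_by exact pvLoopA_dec s h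

def strip_yaml (text : String) : String :=
  -- text = text.rstrip()
  let t0 := PySem.Str.rstrip text
  -- while text.endswith("```"): text = text[:-3]; text = text.rstrip()
  let t1 := pvLoopA t0
  -- if text.startswith("```yaml\n"): text = text[8:]
  if PySem.Str.startswith t1 "```yaml\n" = true then PySem.Str.slice t1 (some 8) none else t1

-- ===== PORT B =====
-- the scan over the reversed character list: skip whitespace, then a 3-backtick fence, repeat
def pvPeel (r : List Char) : List Char :=
  let r' := r.dropWhile PySem.Chars.isspace
  if h : ['`', '`', '`'] <+: r' then pvPeel (r'.drop 3) else r'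
termination_by r.length
decreasing_by
  have hle : r'.length ≤ r.length := List.length_dropWhile_le _ _
  have h3 : 3 ≤ r'.length := by simpa using h.length_le
  have he : r'.length = (r.dropWhile PySem.Chars.isspace).length := rfl
  simp only [List.length_drop]
  omega

def strip_yaml_alt (text : String) : String :=
  let t := String.ofList (pvPeel text.toList.reverse).reverse
  if PySem.Str.startswith t "```yaml\n" = true then PySem.Str.slice t (some 8) none else t

-- ===== PRECONDITION & SPEC =====
def Spec_strip_yaml (text : String) (out : String) : Prop := out = strip_yaml_alt text
instance (text : String) (out : String) : Decidable (Spec_strip_yaml text out) := by unfold Spec_strip_yaml; infer_instance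

-- ===== CLAIM (what is proved, stated in full; the proofs are below) =====
def Claim_equal_strip_yaml : Prop := ∀ (text : String), Dom_strip_yaml text → Spec_strip_yaml text (strip_yaml text)

-- ===== LEMMAS AND PROOFS =====

theorem pvEndswith_ticks (s : String) :
    PySem.Str.endswith s "```" = true ↔ ['`', '`', '`'] <+: s.toList.reverse := by
  constructor
  · intro h
    have hsuf : (['`', '`', '`'] : List Char) <:+ s.toList := by
      simpa using (PySem.Chars.endswith_iff s.toList ("```" : String).toList).mp h
    have h2 : (['`', '`', '`'] : List Char).reverse <:+ s.toList.reverse.reverse := by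
      simpa using hsuf
    exact List.reverse_suffix.mp h2
  · intro h
    have h2 : (['`', '`', '`'] : List Char).reverse <:+ s.toList.reverse.reverse :=
      List.reverse_suffix.mpr h
    exact (PySem.Chars.endswith_iff s.toList ("```" : String).toList).mpr (by simpa using h2)

-- main invariant: A's loop, fed a string whose chars are (dropWhile ws r).reverse,
-- returns the reverse of B's peel of r
theorem pvPeel_eq (r : List Char) :
    pvPeel r = if ['`', '`', '`'] <+: r.dropWhile PySem.Chars.isspace
      then pvPeel ((r.dropWhile PySem.Chars.isspace).drop 3)
      else r.dropWhile PySem.Chars.isspace := by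
  rw [pvPeel]
  split_ifs with h <;> rfl

theorem pvLoopA_eq (s : String) :
    pvLoopA s = if PySem.Str.endswith s "```" = true
      then pvLoopA (PySem.Str.rstrip (PySem.Str.slice s none (some (-3))))
      else s := by
  rw [pvLoopA]
  split_ifs with h <;> rfl

-- main invariant: A's loop, fed a string whose chars are (dropWhile ws r).reverse,
-- returns the reverse of B's peel of r
theorem pvLoop_eq_peel (n : ℕ) : ∀ (r : List Char), r.length ≤ n →
    ∀ (t : String), t.toList = (r.dropWhile PySem.Chars.isspace).reverse →
    (pvLoopA t).toList = (pvPeel r).reverse := by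
  induction n using Nat.strong_induction_on with
  | _ n ih =>
    intro r hr t ht
    rw [pvPeel_eq]
    by_cases h : ['`', '`', '`'] <+: r.dropWhile PySem.Chars.isspace
    · obtain ⟨rest, hrest⟩ := h
      have hend : PySem.Str.endswith t "```" = true := by
        rw [pvEndswith_ticks, ht]
        simpa [← hrest] using List.prefix_append (['`', '`', '`'] : List Char) rest
        
      rw [pvLoopA_eq, if_pos hend]
      have hslice : (PySem.Str.slice t none (some (-3))).toList = rest.reverse := by
        rw [PySem.Str.toList_slice, PySem.Chars.slice_eq_listSlice,
            PySem.List.slice_to_neg_ofNat t.toList 3 (by norm_num), ht, ← hrest]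
        simp
      have hnew : (PySem.Str.rstrip (PySem.Str.slice t none (some (-3)))).toList
          = (rest.dropWhile PySem.Chars.isspace).reverse := by
        rw [PySem.Str.toList_rstrip, PySem.Chars.rstrip, hslice]; simp
      have hrlen : rest.length < n := by
        have h1 : (r.dropWhile PySem.Chars.isspace).length ≤ r.length :=
          List.length_dropWhile_le _ _
        have h2 : rest.length + 3 = (r.dropWhile PySem.Chars.isspace).length := by
          rw [← hrest]; simp
        omega
      have hpre : ['`', '`', '`'] <+: r.dropWhile PySem.Chars.isspace := ⟨rest, hrest⟩
      have hd3 : (r.dropWhile PySem.Chars.isspace).drop 3 = rest := by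
        rw [← hrest]; simp
      rw [ih rest.length hrlen rest le_rfl _ hnew, if_pos hpre, hd3]
    · have hend : ¬ PySem.Str.endswith t "```" = true := by
        rw [pvEndswith_ticks, ht]
        simpa using h
      rw [pvLoopA_eq, if_neg hend, if_neg h, ht]

theorem strip_yaml_spec : Claim_equal_strip_yaml := by
  intro text _
  unfold Spec_strip_yaml strip_yaml strip_yaml_alt
  have h1 : (pvLoopA (PySem.Str.rstrip text)).toList = (pvPeel text.toList.reverse).reverse := by
    apply pvLoop_eq_peel text.toList.reverse.length text.toList.reverse le_rfl
    rw [PySem.Str.toList_rstrip, PySem.Chars.rstrip]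
  have heq : pvLoopA (PySem.Str.rstrip text) = String.ofList (pvPeel text.toList.reverse).reverse :=
    String.toList_injective (by rw [h1, String.toList_ofList])
  simp only [heq]
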